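-- pv_equiv track=rewrite | github.com/williamseddon/testingEnv | starwalk_ui_test.py | insert_after_symptom20
-- ===== SOURCE A (Python) =====
-- from typing import Any, Dict, Iterable, List, Optional, Set, Tuple
--
-- def insert_after_symptom20(out_cols: List[str], extra_cols: List[str]) -> List[str]:
--     base = list(out_cols)
--     extras = [c for c in extra_cols if c and str(c).strip()]
--     if not extras:
--         return base
--     base_no_extras = [c for c in base if c not in extras]
--     try:
--         idx = base_no_extras.index("Symptom 20")
--         return base_no_extras[: idx + 1] + extras + base_no_extras[idx + 1 :]
--     except ValueError:
--         return base_no_extras + extras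
-- ===== SOURCE B (Python) =====
-- def insert_after_symptom20(out_cols, extra_cols):
--     extras = [c for c in extra_cols if c and str(c).strip()]
--     if not extras:
--         return list(out_cols)
--     result = []
--     inserted = False
--     for c in out_cols:
--         if c in extras:
--             continue
--         result.append(c)
--         if not inserted and c == "Symptom 20":
--             result.extend(extras)
--             inserted = True
--     if not inserted:
--         result.extend(extras)
--     return result
-- ===== Notes on version B (the rewrite author's own statement) =====
-- stated objective: alternative
-- what changed: replaces the build-filtered-copy / .index / slice-and-concatenate structure by a single forward pass with an 'inserted' flag that filters, copies and splices the extras in one loop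
import Mathlib
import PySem

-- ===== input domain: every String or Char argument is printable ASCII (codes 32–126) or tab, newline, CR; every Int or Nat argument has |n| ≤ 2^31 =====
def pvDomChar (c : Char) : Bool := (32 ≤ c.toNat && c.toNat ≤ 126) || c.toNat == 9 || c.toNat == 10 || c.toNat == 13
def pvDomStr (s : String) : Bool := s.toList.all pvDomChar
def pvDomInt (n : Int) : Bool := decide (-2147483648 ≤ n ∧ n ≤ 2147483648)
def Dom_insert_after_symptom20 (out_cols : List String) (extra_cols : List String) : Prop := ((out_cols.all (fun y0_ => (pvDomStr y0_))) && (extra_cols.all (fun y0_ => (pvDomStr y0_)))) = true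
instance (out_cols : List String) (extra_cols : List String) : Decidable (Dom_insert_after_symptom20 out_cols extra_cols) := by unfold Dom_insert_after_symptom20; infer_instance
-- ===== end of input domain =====

-- ===== PORT A =====
-- shared helper: the comprehension filter '[c for c in extra_cols if c and str(c).strip()]' (identical in A and B)
def pyTruthyCol (c : String) : Bool := !(c == "") && !((PySem.Str.strip c) == "")

-- One honest line: B replaces A's filtered-copy + .index + slice concatenation by a single
-- forward pass with an 'inserted' flag (objective: alternative decomposition, same cost).
def insert_after_symptom20 (out_cols : List String) (extra_cols : List String) : List String :=
  let base := out_cols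
  let extras := extra_cols.filter pyTruthyCol
  if extras.isEmpty then base
  else
    let base_no_extras := base.filter (fun c => !(extras.contains c))
    match PySem.List.index? base_no_extras "Symptom 20" with
    | some idx =>
        PySem.List.slice base_no_extras none (some ((idx : Int) + 1)) ++ extras ++
          PySem.List.slice base_no_extras (some ((idx : Int) + 1)) none
    | none => base_no_extras ++ extras

-- ===== PORT B =====
-- the body of B's for-loop: state = (result so far, inserted flag)
def altStep (extras : List String) (st : List String × Bool) (c : String) : List String × Bool :=
  if extras.contains c then st
  else
    let r := st.1 ++ [c]
    if !st.2 && (c == "Symptom 20") then (r ++ extras, true) else (r, st.2)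

def insert_after_symptom20_alt (out_cols : List String) (extra_cols : List String) : List String :=
  let extras := extra_cols.filter pyTruthyCol
  if extras.isEmpty then out_cols
  else
    let p := out_cols.foldl (altStep extras) ([], false)
    if !p.2 then p.1 ++ extras else p.1

-- ===== PRECONDITION & SPEC =====
def Spec_insert_after_symptom20 (out_cols : List String) (extra_cols : List String) (out : List String) : Prop := out = insert_after_symptom20_alt out_cols extra_cols
instance (out_cols : List String) (extra_cols : List String) (out : List String) : Decidable (Spec_insert_after_symptom20 out_cols extra_cols out) := by unfold Spec_insert_after_symptom20; infer_instance

-- ===== CLAIM (what is proved, stated in full; the proofs are below) =====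
def Claim_equal_insert_after_symptom20 : Prop := ∀ (out_cols : List String) (extra_cols : List String), Dom_insert_after_symptom20 out_cols extra_cols → Spec_insert_after_symptom20 out_cols extra_cols (insert_after_symptom20 out_cols extra_cols)

-- ===== LEMMAS AND PROOFS =====

-- B's loop leaves the state unchanged on extras members, so folding over out_cols
-- equals folding over A's base_no_extras.
theorem altFold_filter (e : List String) (L : List String) (st : List String × Bool) :
    L.foldl (altStep e) st = (L.filter (fun c => !(e.contains c))).foldl (altStep e) st := by
  induction L generalizing st with
  | nil => rfl
  | cons c L ih =>
      by_cases hc : c ∈ e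
      · rw [List.filter_cons_of_neg (by simp [hc])]
        simp only [List.foldl]
        rw [show altStep e st c = st from by simp [altStep, hc]]
        exact ih st
      · rw [List.filter_cons_of_pos (by simp [hc])]
        simp only [List.foldl]
        exact ih _

-- once inserted, the loop just appends the remaining (non-extras) columns
theorem altFold_true (e : List String) (L : List String) (acc : List String)
    (hL : ∀ c ∈ L, c ∉ e) :
    L.foldl (altStep e) (acc, true) = (acc ++ L, true) := by
  induction L generalizing acc with
  | nil => simp
  | cons c L ih =>
      have hc : c ∉ e := hL c (List.mem_cons_self ..)
      have hstep : altStep e (acc, true) c = (acc ++ [c], true) := by simp [altStep, hc]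
      simp only [List.foldl, hstep]
      rw [ih _ (fun d hd => hL d (List.mem_cons_of_mem _ hd))]
      simp

-- the characterisation of B's loop on a list free of extras, in A's index/take/drop terms
theorem altFold_false (e : List String) (L : List String) (acc : List String)
    (hL : ∀ c ∈ L, c ∉ e) :
    L.foldl (altStep e) (acc, false) =
      match PySem.List.index? L "Symptom 20" with
      | some idx => (acc ++ L.take (idx + 1) ++ e ++ L.drop (idx + 1), true)
      | none => (acc ++ L, false) := by
  induction L generalizing acc with
  | nil => simp [PySem.List.index?]
  | cons c L ih =>
      have hc : c ∉ e := hL c (List.mem_cons_self ..)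
      have hL' : ∀ d ∈ L, d ∉ e := fun d hd => hL d (List.mem_cons_of_mem _ hd)
      by_cases hs : c = "Symptom 20"
      · subst hs
        have hstep : altStep e (acc, false) "Symptom 20" = (acc ++ "Symptom 20" :: e, true) := by
          simp [altStep, hc]
        rw [PySem.List.index?_cons_self]
        simp only [List.foldl, hstep]
        rw [altFold_true e L _ hL']
        simp
      · have hstep : altStep e (acc, false) c = (acc ++ [c], false) := by
          simp [altStep, hc, hs]
        rw [PySem.List.index?_cons_of_ne _ hs]
        simp only [List.foldl, hstep]
        rw [ih (acc ++ [c])  hL']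
        cases hidx : PySem.List.index? L "Symptom 20" with
        | none => simp
        | some idx => simp [List.take_succ_cons, List.drop_succ_cons]

-- ===== VERDICT (by name: the statement is the Claim_ definition above) =====
theorem insert_after_symptom20_spec : Claim_equal_insert_after_symptom20 := by
  intro out_cols extra_cols _
  unfold Spec_insert_after_symptom20 insert_after_symptom20 insert_after_symptom20_alt
  set e := extra_cols.filter pyTruthyCol with he
  by_cases hemp : e.isEmpty
  · simp [hemp]
  · simp only [hemp, Bool.false_eq_true, if_false]
    set L := out_cols.filter (fun c => !(e.contains c)) with hLdef
    have hL : ∀ c ∈ L, c ∉ e := by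
      intro c hcmem
      have := List.of_mem_filter hcmem
      simpa using this
    rw [altFold_filter e out_cols ([], false), ← hLdef, altFold_false e L [] hL]
    cases hidx : PySem.List.index? L "Symptom 20" with
    | none => simp
    | some idx =>
        have h1 : PySem.List.slice L none (some ((idx : Int) + 1)) = L.take (idx + 1) := by
          rw [show ((idx : Int) + 1) = ((idx + 1 : Nat) : Int) by push_cast; ring,
            PySem.List.slice_to_natCast]
        have h2 : PySem.List.slice L (some ((idx : Int) + 1)) none = L.drop (idx + 1) := by
          rw [show ((idx : Int) + 1) = ((idx + 1 : Nat) : Int) by push_cast; ring,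
            PySem.List.slice_from_natCast]
        simp [h1, h2]
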